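-- pv_equiv track=rewrite | github.com/mariafelecann/UBB-CompSci | semester1/fundamentals-of-programming/Assigment1 - algorithms/main.py | nthNumberofSequence
-- ===== SOURCE A (Python) =====
-- def IsItPrime(n):
--     if n==2:
--         return True
--     if n<=1 or n%2==0:
--         return False
--     for i in range(2,int(n/2)):
--         if n%i==0:
--             return False
--     return True
--
-- def nthNumberofSequence(n):
--     counter=0
--     a=1
--     while(counter<n):
--
--         if IsItPrime(a)==True:
--             counter=counter+1
--         else:
--             if(a==1):
--                 counter=counter+1
--             else:
--                 d=2
--                 cop=a
--                 while(d<=cop):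
--                     if int(cop%d)==0:
--                        for i in range(d):
--                            counter=counter+1
--                            if counter==n: return d
--
--                        while(int(cop%d)==0):
--                            cop=int(cop/d)
--
--                     d=d+1
--         if counter==n: return a
--         a=a+1
-- ===== SOURCE B (Python) =====
-- def _distinct_prime_factors(a):
--     """Distinct prime factors of a in ascending order (trial division to sqrt)."""
--     fs = []
--     d = 2
--     while d * d <= a:
--         if a % d == 0:
--             fs.append(d)
--             while a % d == 0:
--                 a //= d
--         d += 1
--     if a > 1:
--         fs.append(a)
--     return fs
--
--
-- def nthNumberofSequence(n):
--     if n <= 0: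
--         return None
--     total = 0
--     a = 1
--     while True:
--         if a == 1:
--             block = [1]
--         else:
--             fs = _distinct_prime_factors(a)
--             if len(fs) == 1 and fs[0] == a:
--                 block = [a]  # a is prime: it contributes itself once
--             else:
--                 block = [d for d in fs for _ in range(d)]
--         if total + len(block) >= n:
--             return block[n - total - 1]
--         total += len(block)
--         a += 1
-- ===== Notes on version B (the rewrite author's own statement) =====
-- stated objective: faster
-- what changed: B replaces A's single counter with early returns threaded through the factoring loop by a per-candidate decomposition: a sqrt-bounded trial-division helper returns the distinct prime factors (also serving as the primality test, replacing A's scan of divisors up to a/2), each candidate's block is built once, a cumulative total of block sizes is kept, and the answer is one indexed lookup into the block that reaches n.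
-- outside the precondition, e.g. on nthNumberofSequence(0): A returns None, B returns None; on nthNumberofSequence(-3): A returns None, B returns None
import Mathlib
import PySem

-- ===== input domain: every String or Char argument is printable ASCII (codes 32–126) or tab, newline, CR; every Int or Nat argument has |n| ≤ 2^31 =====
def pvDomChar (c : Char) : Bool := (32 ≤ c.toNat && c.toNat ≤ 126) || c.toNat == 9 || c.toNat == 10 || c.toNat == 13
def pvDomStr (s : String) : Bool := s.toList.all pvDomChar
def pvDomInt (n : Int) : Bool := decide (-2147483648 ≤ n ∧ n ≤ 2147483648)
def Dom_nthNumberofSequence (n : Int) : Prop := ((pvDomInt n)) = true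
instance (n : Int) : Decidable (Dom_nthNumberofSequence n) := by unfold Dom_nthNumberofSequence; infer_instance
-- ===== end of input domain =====

-- B replaces A's single counter with early returns inside the factoring loop by a per-candidate
-- block (built from distinct prime factors found by sqrt-bounded trial division, which also
-- replaces A's n/2-bounded primality scan) plus a cumulative total and one final indexed lookup.

-- ===== PORT A =====

-- shared inner while loop `while int(cop%d)==0: cop = int(cop/d)` of A (B's helper contains the
-- literally identical loop `while a % d == 0: a //= d`; on the positive values both reach, // and
-- int(/) coincide, so both ports use this one transliteration).
-- The `2 ≤ d ∧ 1 ≤ cop` guard only makes the recursion total; every call both Pythons make satisfies it.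
-- division fact needed by the loops' termination proofs
theorem pvEdivLt (a b : Int) (ha : 1 ≤ a) (hb : 2 ≤ b) : a / b < a := by
  have h := Int.mul_ediv_add_emod a b
  have hr0 := Int.emod_nonneg a (by omega : b ≠ 0)
  have hq0 : 0 ≤ a / b := Int.ediv_nonneg (by omega) (by omega)
  nlinarith [mul_nonneg (show (0:Int) ≤ b - 2 by omega) hq0]

def pvStrip (cop d : Int) : Int :=
  if h : 2 ≤ d ∧ 1 ≤ cop ∧ PySem.Int.mod cop d = 0 then
    pvStrip (PySem.Int.truncdiv cop d) d
  else cop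
termination_by cop.toNat
decreasing_by
  rcases h with ⟨hd, hc, hm⟩
  have h1 : PySem.Int.truncdiv cop d = cop / d := by
    unfold PySem.Int.truncdiv; exact Int.tdiv_eq_ediv_of_nonneg (by omega)
  have h2 : cop / d < cop := pvEdivLt cop d (by omega) (by omega)
  have h3 : 0 ≤ cop / d := Int.ediv_nonneg (by omega) (by omega)
  omega

def pvIsItPrime (m : Int) : Bool :=
  if m = 2 then true
  else if m ≤ 1 ∨ PySem.Int.mod m 2 = 0 then false
  else if (PySem.List.pyRange 2 (PySem.Int.truncdiv m 2) 1).any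
            (fun i => PySem.Int.mod m i = 0) then false
  else true

-- the `for i in range(d): counter += 1; if counter == n: return d` loop
def pvForCount (k : Nat) (counter n d : Int) : Option Int × Int :=
  match k with
  | 0 => (none, counter)
  | k + 1 =>
    if counter + 1 = n then (some d, counter + 1)
    else pvForCount k (counter + 1) n d

-- needed by pvFactorLoop's termination proof
theorem pvStrip_le (cop d : Int) (hc : 1 ≤ cop) : pvStrip cop d ≤ cop := by
  induction hk : cop.toNat using Nat.strong_induction_on generalizing cop with
  | _ k ih =>
    rw [pvStrip]
    split
    · next h =>
      rcases h with ⟨hd, hc', hm⟩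
      have h1 : PySem.Int.truncdiv cop d = cop / d := by
        unfold PySem.Int.truncdiv; exact Int.tdiv_eq_ediv_of_nonneg (by omega)
      rw [h1]
      have h2 : cop / d < cop := pvEdivLt cop d (by omega) (by omega)
      have h3 : 1 ≤ cop / d := by
        have hdvd : d ∣ cop := (PySem.Int.mod_eq_zero_iff_dvd cop d).mp hm
        have : d ≤ cop := Int.le_of_dvd (by omega) hdvd
        exact Int.le_ediv_iff_mul_le (by omega) |>.mpr (by omega)
      have := ih (cop / d).toNat (by omega) (cop / d) h3 rfl
      omega
    · omega

-- A's factoring loop `d=2; cop=a; while d<=cop: …` with the two early-return counters.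
-- Guard conjuncts `2 ≤ d ∧ 1 ≤ cop` only make the recursion total (always true in A's calls).
def pvFactorLoop (d cop counter n : Int) : Option Int × Int :=
  if h : d ≤ cop ∧ 2 ≤ d ∧ 1 ≤ cop then
    if PySem.Int.mod cop d = 0 then
      match pvForCount d.toNat counter n d with
      | (some r, c) => (some r, c)
      | (none, c) => pvFactorLoop (d + 1) (pvStrip cop d) c n
    else pvFactorLoop (d + 1) cop counter n
  else (none, counter)
termination_by (cop + 1 - d).toNat
decreasing_by
  · rcases h with ⟨h1, h2, h3⟩
    have := pvStrip_le cop d h3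
    omega
  · rcases h with ⟨h1, h2, h3⟩
    omega

-- A's outer `while counter < n` loop; fuel only makes it total (n iterations always suffice),
-- 0 on exhaustion / when the loop falls through (Python returns None there; excluded by Pre_).
def pvLoopA (fuel : Nat) (counter a n : Int) : Int :=
  match fuel with
  | 0 => 0
  | f + 1 =>
    if counter < n then
      if pvIsItPrime a then
        if counter + 1 = n then a else pvLoopA f (counter + 1) (a + 1) n
      else if a = 1 then
        if counter + 1 = n then a else pvLoopA f (counter + 1) (a + 1) n
      else
        match pvFactorLoop 2 a counter n with
        | (some r, _) => r
        | (none, c) => if c = n then a else pvLoopA f c (a + 1) n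
    else 0

def nthNumberofSequence (n : Int) : Int := pvLoopA (n.toNat + 1) 0 1 n

-- ===== PORT B =====

-- B's helper _distinct_prime_factors: sqrt-bounded trial division, leftover cofactor appended.
-- Guard conjunct `2 ≤ d` only makes the recursion total (d starts at 2 and only grows).
def pvDpfLoop (d a : Int) (fs : List Int) : List Int :=
  if h : d * d ≤ a ∧ 2 ≤ d then
    if PySem.Int.mod a d = 0 then pvDpfLoop (d + 1) (pvStrip a d) (fs ++ [d])
    else pvDpfLoop (d + 1) a fs
  else if 1 < a then fs ++ [a] else fs
termination_by (a + 1 - d).toNat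
decreasing_by
  · rcases h with ⟨h1, h2⟩
    have hda : d ≤ a := le_trans (le_mul_of_one_le_left (by omega) (by omega)) h1
    have := pvStrip_le a d (by omega)
    omega
  · rcases h with ⟨h1, h2⟩
    have hda : d ≤ a := le_trans (le_mul_of_one_le_left (by omega) (by omega)) h1
    omega

def pvDpf (a : Int) : List Int := pvDpfLoop 2 a []

-- B's per-candidate block
def pvBlock (a : Int) : List Int :=
  if a = 1 then [1]
  else
    let fs := pvDpf a
    if fs = [a] then [a]
    else fs.flatMap (fun d => List.replicate d.toNat d)

-- B's `while True` loop over candidates a with the cumulative total; fuel for totality only.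
def pvLoopB (fuel : Nat) (total a n : Int) : Int :=
  match fuel with
  | 0 => 0
  | f + 1 =>
    let block := pvBlock a
    if n ≤ total + block.length then (PySem.List.pyGet? block (n - total - 1)).getD 0
    else pvLoopB f (total + block.length) (a + 1) n

def nthNumberofSequence_alt (n : Int) : Int :=
  if n ≤ 0 then 0 else pvLoopB (n.toNat + 1) 0 1 n

-- ===== PRECONDITION & SPEC =====
-- Pre_ excludes n ≤ 0, where Python A's while loop never runs and A returns None (no int value);
-- B likewise returns None there.
def Pre_nthNumberofSequence (n : Int) : Prop := 1 ≤ n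
instance (n : Int) : Decidable (Pre_nthNumberofSequence n) := by unfold Pre_nthNumberofSequence; infer_instance
def pvWitness_nthNumberofSequence : Int := 7

def Spec_nthNumberofSequence (n : Int) (out : Int) : Prop := out = nthNumberofSequence_alt n
instance (n : Int) (out : Int) : Decidable (Spec_nthNumberofSequence n out) := by unfold Spec_nthNumberofSequence; infer_instance

-- ===== CLAIM (what is proved, stated in full; the proofs are below) =====
def Claim_equal_nthNumberofSequence : Prop := ∀ (n : Int), Dom_nthNumberofSequence n → Pre_nthNumberofSequence n → Spec_nthNumberofSequence n (nthNumberofSequence n)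

-- ===== LEMMAS AND PROOFS =====

-- A's factoring loop with the counting stripped out: the distinct factors it emits, in order.
def pvPureFactors (d cop : Int) : List Int :=
  if h : d ≤ cop ∧ 2 ≤ d ∧ 1 ≤ cop then
    if PySem.Int.mod cop d = 0 then d :: pvPureFactors (d + 1) (pvStrip cop d)
    else pvPureFactors (d + 1) cop
  else []
termination_by (cop + 1 - d).toNat
decreasing_by
  · rcases h with ⟨h1, h2, h3⟩
    have := pvStrip_le cop d h3
    omega
  · rcases h with ⟨h1, h2, h3⟩
    omega

-- the flattened block of a factor list
def pvChunks (L : List Int) : List Int := L.flatMap (fun d => List.replicate d.toNat d)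

-- unit-step scan of a list: counter ticks once per element, returns the element reaching n
def pvScan : List Int → Int → Int → Option Int × Int
  | [], c, _ => (none, c)
  | x :: xs, c, n => if c + 1 = n then (some x, c + 1) else pvScan xs (c + 1) n

-- recursion-free acc description of B's factor loop
def pvDpfB (d a : Int) : List Int :=
  if h : d * d ≤ a ∧ 2 ≤ d then
    if PySem.Int.mod a d = 0 then d :: pvDpfB (d + 1) (pvStrip a d)
    else pvDpfB (d + 1) a
  else if 1 < a then [a] else []
termination_by (a + 1 - d).toNat
decreasing_by
  · rcases h with ⟨h1, h2⟩
    have hda : d ≤ a := le_trans (le_mul_of_one_le_left (by omega) (by omega)) h1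
    have := pvStrip_le a d (by omega)
    omega
  · rcases h with ⟨h1, h2⟩
    have hda : d ≤ a := le_trans (le_mul_of_one_le_left (by omega) (by omega)) h1
    omega

-- "no divisor below d": the invariant of both trial-division loops
def pvNoDiv (d cop : Int) : Prop := ∀ e : Int, 2 ≤ e → e < d → ¬ e ∣ cop

theorem pvStrip_pos (cop d : Int) (hc : 1 ≤ cop) : 1 ≤ pvStrip cop d := by
  induction hk : cop.toNat using Nat.strong_induction_on generalizing cop with
  | _ k ih =>
    rw [pvStrip]
    split
    · next h =>
      rcases h with ⟨hd, hc', hm⟩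
      have h1 : PySem.Int.truncdiv cop d = cop / d := by
        unfold PySem.Int.truncdiv; exact Int.tdiv_eq_ediv_of_nonneg (by omega)
      rw [h1]
      have h2 : cop / d < cop := pvEdivLt cop d (by omega) (by omega)
      have h3 : 1 ≤ cop / d := by
        have hdvd : d ∣ cop := (PySem.Int.mod_eq_zero_iff_dvd cop d).mp hm
        have : d ≤ cop := Int.le_of_dvd (by omega) hdvd
        exact Int.le_ediv_iff_mul_le (by omega) |>.mpr (by omega)
      exact ih (cop / d).toNat (by omega) (cop / d) h3 rfl
    · omega

theorem pvStrip_dvd (cop d : Int) : pvStrip cop d ∣ cop := by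
  induction hk : cop.toNat using Nat.strong_induction_on generalizing cop with
  | _ k ih =>
    rw [pvStrip]
    split
    · next h =>
      rcases h with ⟨hd, hc', hm⟩
      have hdvd : d ∣ cop := (PySem.Int.mod_eq_zero_iff_dvd cop d).mp hm
      have h1 : PySem.Int.truncdiv cop d = cop / d := by
        unfold PySem.Int.truncdiv; exact Int.tdiv_eq_ediv_of_nonneg (by omega)
      rw [h1]
      have h2 : cop / d < cop := pvEdivLt cop d (by omega) (by omega)
      have h3 : 0 ≤ cop / d := Int.ediv_nonneg (by omega) (by omega)
      have hq : cop / d ∣ cop := ⟨d, (Int.ediv_mul_cancel hdvd).symm⟩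
      exact dvd_trans (ih (cop / d).toNat (by omega) (cop / d) rfl) hq
    · exact dvd_refl cop

theorem pvStrip_not_dvd (cop d : Int) (hd : 2 ≤ d) (hc : 1 ≤ cop) : ¬ d ∣ pvStrip cop d := by
  induction hk : cop.toNat using Nat.strong_induction_on generalizing cop with
  | _ k ih =>
    rw [pvStrip]
    split
    · next h =>
      rcases h with ⟨_, hc', hm⟩
      have hdvd : d ∣ cop := (PySem.Int.mod_eq_zero_iff_dvd cop d).mp hm
      have h1 : PySem.Int.truncdiv cop d = cop / d := by
        unfold PySem.Int.truncdiv; exact Int.tdiv_eq_ediv_of_nonneg (by omega)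
      rw [h1]
      have h2 : cop / d < cop := pvEdivLt cop d (by omega) (by omega)
      have h3 : 1 ≤ cop / d := by
        have : d ≤ cop := Int.le_of_dvd (by omega) hdvd
        exact Int.le_ediv_iff_mul_le (by omega) |>.mpr (by omega)
      exact ih (cop / d).toNat (by omega) (cop / d) h3 rfl
    · next h =>
      intro hdvd
      exact h ⟨hd, hc, (PySem.Int.mod_eq_zero_iff_dvd cop d).mpr hdvd⟩

theorem pvScan_append (L1 L2 : List Int) (c n : Int) :
    pvScan (L1 ++ L2) c n =
      match pvScan L1 c n with
      | (some x, c') => (some x, c')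
      | (none, c') => pvScan L2 c' n := by
  induction L1 generalizing c with
  | nil => simp [pvScan]
  | cons x xs ih =>
    simp only [List.cons_append, pvScan]
    by_cases h : c + 1 = n
    · simp [h]
    · simp only [if_neg h]; exact ih (c + 1)

theorem pvScan_none (L : List Int) (c n : Int) (h : c + L.length < n) :
    pvScan L c n = (none, c + L.length) := by
  induction L generalizing c with
  | nil => simp [pvScan]
  | cons x xs ih =>
    simp only [List.length_cons] at h ⊢
    rw [pvScan, if_neg (by push_cast at h ⊢; omega)]
    rw [ih (c + 1) (by push_cast at h ⊢; omega)]
    congr 1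
    push_cast
    ring

theorem pvScan_some (L : List Int) (c n : Int) (h1 : c < n) (h2 : n ≤ c + L.length) :
    (pvScan L c n).1 = PySem.List.pyGet? L (n - c - 1) := by
  induction L generalizing c with
  | nil => simp at h2; omega
  | cons x xs ih =>
    rw [pvScan]
    by_cases h : c + 1 = n
    · have : n - c - 1 = 0 := by omega
      rw [this, if_pos h, PySem.List.pyGet?_zero_cons]
    · rw [if_neg h]
      have hx : (pvScan xs (c + 1) n).1 = PySem.List.pyGet? xs (n - (c + 1) - 1) := by
        apply ih (c + 1) (by omega)
        simp only [List.length_cons] at h2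
        push_cast at h2 ⊢
        omega
      rw [hx]
      have hidx : n - c - 1 = (n - (c + 1) - 1) + 1 := by omega
      have hnn : 0 ≤ n - (c + 1) - 1 := by omega
      rw [hidx, show n - (c + 1) - 1 = ((n - (c + 1) - 1).toNat : Int) by omega,
        PySem.List.pyGet?_cons_succ]

theorem pvForCount_eq_scan (k : Nat) (c n d : Int) :
    pvForCount k c n d = pvScan (List.replicate k d) c n := by
  induction k generalizing c with
  | zero => simp [pvForCount, pvScan]
  | succ k ih =>
    rw [pvForCount, List.replicate_succ, pvScan]
    by_cases h : c + 1 = n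
    · simp [h]
    · simp only [if_neg h]; exact ih (c + 1)

theorem pvFactorLoop_eq_scan (d cop c n : Int) :
    pvFactorLoop d cop c n = pvScan (pvChunks (pvPureFactors d cop)) c n := by
  induction hk : (cop + 1 - d).toNat using Nat.strong_induction_on generalizing d cop c with
  | _ k ih =>
    rw [pvFactorLoop, pvPureFactors]
    split
    · next h =>
      rcases h with ⟨h1, h2, h3⟩
      by_cases hm : PySem.Int.mod cop d = 0
      · rw [if_pos hm, if_pos hm]
        have hchunk : pvChunks (d :: pvPureFactors (d + 1) (pvStrip cop d)) =
            List.replicate d.toNat d ++ pvChunks (pvPureFactors (d + 1) (pvStrip cop d)) := by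
          simp [pvChunks]
        rw [hchunk, pvScan_append, pvForCount_eq_scan]
        rcases hsc : pvScan (List.replicate d.toNat d) c n with ⟨o, c'⟩
        cases o with
        | some r => rfl
        | none =>
          have hs1 := pvStrip_le cop d h3
          exact ih (pvStrip cop d + 1 - (d + 1)).toNat (by omega) (d + 1) (pvStrip cop d) c' rfl
      · rw [if_neg hm, if_neg hm]
        exact ih (cop + 1 - (d + 1)).toNat (by omega) (d + 1) cop c rfl
    · simp [pvChunks, pvScan]

theorem pvDpfLoop_acc (d a : Int) (fs : List Int) : pvDpfLoop d a fs = fs ++ pvDpfB d a := by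
  induction hk : (a + 1 - d).toNat using Nat.strong_induction_on generalizing d a fs with
  | _ k ih =>
    rw [pvDpfLoop, pvDpfB]
    split
    · next h =>
      rcases h with ⟨h1, h2⟩
      have hda : d ≤ a := le_trans (le_mul_of_one_le_left (by omega) (by omega)) h1
      by_cases hm : PySem.Int.mod a d = 0
      · rw [if_pos hm, if_pos hm]
        have hs1 := pvStrip_le a d (by omega)
        rw [ih (pvStrip a d + 1 - (d + 1)).toNat (by omega) (d + 1) (pvStrip a d) (fs ++ [d]) rfl]
        simp
      · rw [if_neg hm, if_neg hm]
        exact ih (a + 1 - (d + 1)).toNat (by omega) (d + 1) a fs rfl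
    · split <;> simp

theorem pvStrip_self (d : Int) (hd : 2 ≤ d) : pvStrip d d = 1 := by
  rw [pvStrip, dif_pos ⟨hd, by omega, (PySem.Int.mod_eq_zero_iff_dvd d d).mpr dvd_rfl⟩]
  have h1 : PySem.Int.truncdiv d d = 1 := by
    unfold PySem.Int.truncdiv
    rw [Int.tdiv_eq_ediv_of_nonneg (by omega), Int.ediv_self (by omega)]
  rw [h1, pvStrip]
  rw [dif_neg]
  intro ⟨_, _, hm⟩
  rw [show PySem.Int.mod 1 d = 1 % d from PySem.Int.mod_eq_emod_of_pos (by omega),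
    Int.emod_eq_of_lt (by omega) (by omega)] at hm
  omega

theorem pvPureFactors_one (d : Int) (hd : 2 ≤ d) : pvPureFactors d 1 = [] := by
  rw [pvPureFactors, dif_neg]
  intro ⟨h1, _, _⟩
  omega

-- past the sqrt bound the invariant forces cop prime (or 1)
theorem pvPureFactors_tail (d cop : Int) (hd : 2 ≤ d) (hc : 1 ≤ cop) (hlt : cop < d * d)
    (hI : pvNoDiv d cop) : pvPureFactors d cop = if 1 < cop then [cop] else [] := by
  induction hk : (cop + 1 - d).toNat using Nat.strong_induction_on generalizing d cop with
  | _ k ih =>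
    rw [pvPureFactors]
    by_cases hg : d ≤ cop
    · rw [dif_pos ⟨hg, hd, hc⟩]
      by_cases hm : PySem.Int.mod cop d = 0
      · rw [if_pos hm]
        have hdvd : d ∣ cop := (PySem.Int.mod_eq_zero_iff_dvd cop d).mp hm
        have hqeq : d * (cop / d) = cop := Int.mul_ediv_cancel' hdvd
        have hq1 : 1 ≤ cop / d := by
          exact Int.le_ediv_iff_mul_le (by omega) |>.mpr (by omega)
        have hqd : cop / d < d := by nlinarith
        have hcd : cop = d := by
          by_cases h2 : 2 ≤ cop / d
          · exact absurd ⟨d, (Int.ediv_mul_cancel hdvd).symm⟩ (hI (cop / d) h2 hqd)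
          · have h1 : cop / d = 1 := by omega
            rw [h1, mul_one] at hqeq
            omega
        subst hcd
        rw [pvStrip_self cop hd, pvPureFactors_one _ (by omega), if_pos (by omega)]
      · rw [if_neg hm]
        have hnd : ¬ d ∣ cop := fun hdvd => hm ((PySem.Int.mod_eq_zero_iff_dvd cop d).mpr hdvd)
        have hI' : pvNoDiv (d + 1) cop := by
          intro e he1 he2 hdvd
          rcases lt_or_eq_of_le (by omega : e ≤ d) with h | h
          · exact hI e he1 h hdvd
          · exact hnd (h ▸ hdvd)
        exact ih (cop + 1 - (d + 1)).toNat (by omega) (d + 1) cop (by omega) hc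
          (by nlinarith) hI' rfl
    · rw [dif_neg (by intro h; exact hg h.1)]
      rw [if_neg]
      intro h1
      exact hI cop (by omega) (by omega) dvd_rfl

theorem pvPureFactors_eq_dpfB (d cop : Int) (hd : 2 ≤ d) (hc : 1 ≤ cop) (hI : pvNoDiv d cop) :
    pvPureFactors d cop = pvDpfB d cop := by
  induction hk : (cop + 1 - d).toNat using Nat.strong_induction_on generalizing d cop with
  | _ k ih =>
    rw [pvDpfB]
    by_cases hg : d * d ≤ cop
    · rw [dif_pos ⟨hg, hd⟩]
      have hda : d ≤ cop := le_trans (le_mul_of_one_le_left (by omega) (by omega)) hg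
      rw [pvPureFactors, dif_pos ⟨hda, hd, hc⟩]
      by_cases hm : PySem.Int.mod cop d = 0
      · rw [if_pos hm, if_pos hm]
        have hs1 := pvStrip_le cop d hc
        have hs2 := pvStrip_pos cop d hc
        have hsd := pvStrip_dvd cop d
        have hI' : pvNoDiv (d + 1) (pvStrip cop d) := by
          intro e he1 he2 hdvd
          rcases lt_or_eq_of_le (by omega : e ≤ d) with h | h
          · exact hI e he1 h (dvd_trans hdvd hsd)
          · exact pvStrip_not_dvd cop d hd hc (h ▸ hdvd)
        rw [ih (pvStrip cop d + 1 - (d + 1)).toNat (by omega) (d + 1) (pvStrip cop d)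
          (by omega) hs2 hI' rfl]
      · rw [if_neg hm, if_neg hm]
        have hnd : ¬ d ∣ cop := fun hdvd => hm ((PySem.Int.mod_eq_zero_iff_dvd cop d).mpr hdvd)
        have hI' : pvNoDiv (d + 1) cop := by
          intro e he1 he2 hdvd
          rcases lt_or_eq_of_le (by omega : e ≤ d) with h | h
          · exact hI e he1 h hdvd
          · exact hnd (h ▸ hdvd)
        exact ih (cop + 1 - (d + 1)).toNat (by omega) (d + 1) cop (by omega) hc hI' rfl
    · rw [dif_neg (by intro h; exact hg h.1)]
      exact pvPureFactors_tail d cop hd hc (by omega) hI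

theorem pvIsItPrime_iff (a : Int) (ha : 2 ≤ a) : pvIsItPrime a = true ↔ pvNoDiv a a := by
  unfold pvIsItPrime
  by_cases h2 : a = 2
  · subst h2
    refine ⟨fun _ e he1 he2 => absurd he2 (by omega), fun _ => by simp⟩
  · rw [if_neg h2]
    by_cases hm2 : PySem.Int.mod a 2 = 0
    · rw [if_pos (Or.inr hm2)]
      simp only [Bool.false_eq_true, false_iff]
      intro hP
      have hdvd : (2 : Int) ∣ a := (PySem.Int.mod_eq_zero_iff_dvd a 2).mp hm2
      have ha4 : 4 ≤ a := by
        rcases hdvd with ⟨t, ht⟩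
        omega
      exact hP 2 le_rfl (by omega) hdvd
    · rw [if_neg (by push_neg; exact ⟨by omega, hm2⟩)]
      have htd : PySem.Int.truncdiv a 2 = a / 2 := by
        unfold PySem.Int.truncdiv; exact Int.tdiv_eq_ediv_of_nonneg (by omega)
      split_ifs with hany
      · simp only [Bool.false_eq_true, false_iff]
        intro hP
        rcases List.any_eq_true.mp hany with ⟨i, hiR, hpi⟩
        rcases (PySem.List.mem_pyRange_one).mp hiR with ⟨hi2, hilt⟩
        rw [htd] at hilt
        have hia : i < a := lt_of_lt_of_le hilt (le_of_lt (pvEdivLt a 2 (by omega) le_rfl))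
        exact hP i hi2 hia ((PySem.Int.mod_eq_zero_iff_dvd a i).mp (by simpa using hpi))
      · simp only [true_iff]
        intro e he1 hea hdvd
        apply hany
        rw [List.any_eq_true]
        have he0 : (0 : Int) < e := by omega
        have hfe : e * (a / e) = a := Int.mul_ediv_cancel' hdvd
        set f := a / e with hf
        have hf1 : 1 ≤ f := Int.le_ediv_iff_mul_le he0 |>.mpr (by omega)
        have hf2 : 2 ≤ f := by
          rcases eq_or_lt_of_le hf1 with h | h
          · rw [← h, mul_one] at hfe; omega
          · omega
        have hfd : f ∣ a := ⟨e, by rw [← hfe]; ring⟩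
        have hgd : min e f ∣ a := by
          rcases le_total e f with h | h
          · rw [min_eq_left h]; exact hdvd
          · rw [min_eq_right h]; exact hfd
        have hg2 : 2 ≤ min e f := le_min he1 hf2
        have hg3 : 3 ≤ min e f := by
          rcases eq_or_lt_of_le hg2 with h | h
          · exfalso
            apply hm2
            rw [PySem.Int.mod_eq_zero_iff_dvd]
            rw [← h] at hgd
            exact hgd
          · omega
        have hgg : min e f * min e f ≤ a := by
          calc min e f * min e f ≤ e * f :=
                mul_le_mul (min_le_left e f) (min_le_right e f) (by omega) (by omega)
            _ = a := hfe
        have hbound : min e f + 1 ≤ a / 2 :=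
          Int.le_ediv_iff_mul_le (by omega) |>.mpr (by nlinarith)
        refine ⟨min e f, (PySem.List.mem_pyRange_one).mpr ⟨by omega, by rw [htd]; omega⟩, ?_⟩
        simp [PySem.Int.mod_eq_zero_iff_dvd, hgd]

theorem pvPureFactors_of_prime (a d : Int) (ha : 2 ≤ a) (hP : pvNoDiv a a)
    (hd : 2 ≤ d) (hda : d ≤ a) : pvPureFactors d a = [a] := by
  induction hk : (a - d).toNat using Nat.strong_induction_on generalizing d with
  | _ k ih =>
    rw [pvPureFactors, dif_pos ⟨hda, hd, by omega⟩]
    by_cases hm : PySem.Int.mod a d = 0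
    · have hdvd : d ∣ a := (PySem.Int.mod_eq_zero_iff_dvd a d).mp hm
      have hde : d = a := by
        by_contra hne
        exact hP d hd (by omega) hdvd
      rw [if_pos hm, hde, pvStrip_self a (by omega), pvPureFactors_one _ (by omega)]
    · rw [if_neg hm]
      have hne : d ≠ a := by
        intro h
        exact hm ((PySem.Int.mod_eq_zero_iff_dvd a d).mpr (h ▸ dvd_rfl))
      exact ih (a - (d + 1)).toNat (by omega) (d + 1) (by omega) (by omega) rfl

-- when a has a divisor in [d, a), the loop's first emitted factor is < a
theorem pvPureFactors_head (a : Int) (ha : 2 ≤ a) : ∀ d, 2 ≤ d →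
    (∃ e, d ≤ e ∧ e < a ∧ e ∣ a) → ∃ p xs, pvPureFactors d a = p :: xs ∧ p < a := by
  intro d hd he
  induction hk : (a - d).toNat using Nat.strong_induction_on generalizing d with
  | _ k ih =>
    rcases he with ⟨e, hde, hea, hdvd⟩
    rw [pvPureFactors, dif_pos ⟨by omega, hd, by omega⟩]
    by_cases hm : PySem.Int.mod a d = 0
    · exact ⟨d, _, by rw [if_pos hm], by omega⟩
    · rw [if_neg hm]
      have hne : d ≠ e := by
        intro h
        exact hm ((PySem.Int.mod_eq_zero_iff_dvd a d).mpr (h ▸ hdvd))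
      exact ih (a - (d + 1)).toNat (by omega) (d + 1) (by omega)
        ⟨e, by omega, hea, hdvd⟩ rfl

theorem pvPureFactors_ne_of_not_prime (a : Int) (ha : 2 ≤ a) (hP : ¬ pvNoDiv a a) :
    pvPureFactors 2 a ≠ [a] := by
  unfold pvNoDiv at hP
  push_neg at hP
  rcases hP with ⟨e, he1, he2, hdvd⟩
  rcases pvPureFactors_head a ha 2 le_rfl ⟨e, he1, he2, hdvd⟩ with ⟨p, xs, heq, hp⟩
  rw [heq]
  intro hcontra
  rw [List.cons.injEq] at hcontra
  omega

theorem pvDpf_eq_pure (a : Int) (ha : 1 ≤ a) : pvDpf a = pvPureFactors 2 a := by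
  unfold pvDpf
  rw [pvDpfLoop_acc, List.nil_append,
    pvPureFactors_eq_dpfB 2 a le_rfl ha (by intro e he1 he2; omega)]

theorem pvBlock_prime (a : Int) (ha : 2 ≤ a) (hp : pvIsItPrime a = true) : pvBlock a = [a] := by
  have hfs : pvDpf a = [a] :=
    (pvDpf_eq_pure a (by omega)).trans
      (pvPureFactors_of_prime a 2 ha ((pvIsItPrime_iff a ha).mp hp) le_rfl ha)
  unfold pvBlock
  rw [if_neg (by omega : ¬ a = 1)]
  simp [hfs]

theorem pvBlock_composite (a : Int) (ha : 2 ≤ a) (hp : pvIsItPrime a = false) :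
    pvBlock a = pvChunks (pvPureFactors 2 a) := by
  have hnp : ¬ pvNoDiv a a := fun hP => by
    rw [(pvIsItPrime_iff a ha).mpr hP] at hp
    exact Bool.true_eq_false.mp hp
  have hfs : pvDpf a = pvPureFactors 2 a := pvDpf_eq_pure a (by omega)
  have hne : pvDpf a ≠ [a] := by
    rw [hfs]
    exact pvPureFactors_ne_of_not_prime a ha hnp
  unfold pvBlock
  rw [if_neg (by omega : ¬ a = 1)]
  simp only [hfs]
  rw [if_neg (pvPureFactors_ne_of_not_prime a ha hnp)]
  simp [pvChunks]

-- a unit block [v] is handled identically by both loops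
theorem pvLoop_unit (f : Nat) (n c a v : Int) (hcn : c < n)
    (hih : c + 1 < n → pvLoopA f (c + 1) (a + 1) n = pvLoopB f (c + 1) (a + 1) n) :
    (if c + 1 = n then v else pvLoopA f (c + 1) (a + 1) n) =
      (if n ≤ c + (([v] : List Int).length : Int) then
        (PySem.List.pyGet? [v] (n - c - 1)).getD 0
      else pvLoopB f (c + (([v] : List Int).length : Int)) (a + 1) n) := by
  simp only [List.length_cons, List.length_nil, Nat.cast_one, Nat.cast_zero]
  by_cases he : c + 1 = n
  · rw [if_pos he, if_pos (by omega), show n - c - 1 = 0 by omega,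
      PySem.List.pyGet?_zero_cons]
    rfl
  · rw [if_neg he, if_neg (by push_cast; omega)]
    norm_num
    exact hih (by omega)

theorem pvLoop_eq (f : Nat) : ∀ (n c a : Int), c < n → 1 ≤ a →
    pvLoopA f c a n = pvLoopB f c a n := by
  induction f with
  | zero => intro n c a _ _; rfl
  | succ f ih =>
    intro n c a hcn ha1
    show (if c < n then _ else _) = _
    rw [if_pos hcn]
    show _ = (let block := pvBlock a;
      if n ≤ c + (block.length : Int) then (PySem.List.pyGet? block (n - c - 1)).getD 0
      else pvLoopB f (c + (block.length : Int)) (a + 1) n)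
    by_cases hp : pvIsItPrime a = true
    · have ha2 : 2 ≤ a := by
        by_contra hcon
        unfold pvIsItPrime at hp
        rw [if_neg (by omega), if_pos (Or.inl (by omega))] at hp
        exact Bool.false_ne_true hp
      rw [if_pos hp, pvBlock_prime a ha2 hp]
      exact pvLoop_unit f n c a a hcn (fun h => ih n (c + 1) (a + 1) h (by omega))
    · rw [if_neg hp]
      by_cases h1 : a = 1
      · subst h1
        rw [if_pos rfl, show pvBlock 1 = [1] from by unfold pvBlock; rw [if_pos rfl]]
        exact pvLoop_unit f n c 1 1 hcn (fun h => ih n (c + 1) (1 + 1) h (by omega))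
      · have ha2 : 2 ≤ a := by omega
        rw [if_neg h1, pvFactorLoop_eq_scan 2 a c n,
          pvBlock_composite a ha2 (Bool.not_eq_true _ ▸ hp)]
        set L := pvChunks (pvPureFactors 2 a) with hL
        by_cases hle : n ≤ c + (L.length : Int)
        · have hs := pvScan_some L c n hcn (by push_cast at hle ⊢; omega)
          rcases hsc : pvScan L c n with ⟨o, c2⟩
          rw [hsc] at hs
          obtain ⟨v, hv⟩ : ∃ v, PySem.List.pyGet? L (n - c - 1) = some v :=
            ⟨_, PySem.List.pyGet?_eq_some_getElem L (by omega) (by push_cast at hle ⊢; omega)⟩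
          rw [hv] at hs
          simp only at hs
          subst hs
          rw [if_pos hle, hv]
          rfl
        · have hs := pvScan_none L c n (by push_cast at hle ⊢; omega)
          rw [hs, if_neg hle]
          show (if c + (L.length : Int) = n then a else pvLoopA f (c + (L.length : Int)) (a + 1) n) = _
          rw [if_neg (by push_cast at hle ⊢; omega)]
          exact ih n (c + (L.length : Int)) (a + 1) (by push_cast at hle ⊢; omega) (by omega)

-- ===== VERDICT (by name: the statement is the Claim_ definition above) =====
theorem nthNumberofSequence_spec : Claim_equal_nthNumberofSequence := by
  intro n _ hn
  unfold Spec_nthNumberofSequence nthNumberofSequence nthNumberofSequence_alt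
  have h : ¬ n ≤ 0 := by unfold Pre_nthNumberofSequence at hn; omega
  rw [if_neg h]
  exact pvLoop_eq (n.toNat + 1) n 0 1 (by omega) (by omega)
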